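-- pv_equiv track=rewrite | github.com/gorodnitskiy/ocr_car_registration_plates | dataset.py | compute_mask
-- ===== SOURCE A (Python) =====
-- from typing import List, Dict, Optional
-- from string import digits, ascii_uppercase
--
-- def compute_mask(text: str) -> Optional[str]:
--     """Compute letter-digit mask of text.
--     Accepts string of text.
--     Returns string of the same length but with every letter replaced by 'L' and every digit replaced by 'D'.
--     e.g. 'E506EC152' -> 'LDDDLLDDD'.
--     Returns None if non-letter and non-digit character met in text.
--     """
--     mask = []
--     for char in text:
--         if char in digits:
--             mask.append("D")
--         elif char in ascii_uppercase:
--             mask.append("L")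
--         else:
--             return None
--     return "".join(mask)
-- ===== SOURCE B (Python) =====
-- from string import digits, ascii_uppercase
--
-- _TABLE = {**{ord(c): "D" for c in digits}, **{ord(c): "L" for c in ascii_uppercase}}
-- _VALID = set(digits + ascii_uppercase)
--
-- def compute_mask(text):
--     if not set(text) <= _VALID:
--         return None
--     return text.translate(_TABLE)
-- ===== Notes on version B (the rewrite author's own statement) =====
-- stated objective: idiomatic
-- what changed: Replaces the char-by-char accumulate-with-early-return loop by a whole-string validity test (set inclusion) followed by a single table-driven str.translate transform.
import Mathlib
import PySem

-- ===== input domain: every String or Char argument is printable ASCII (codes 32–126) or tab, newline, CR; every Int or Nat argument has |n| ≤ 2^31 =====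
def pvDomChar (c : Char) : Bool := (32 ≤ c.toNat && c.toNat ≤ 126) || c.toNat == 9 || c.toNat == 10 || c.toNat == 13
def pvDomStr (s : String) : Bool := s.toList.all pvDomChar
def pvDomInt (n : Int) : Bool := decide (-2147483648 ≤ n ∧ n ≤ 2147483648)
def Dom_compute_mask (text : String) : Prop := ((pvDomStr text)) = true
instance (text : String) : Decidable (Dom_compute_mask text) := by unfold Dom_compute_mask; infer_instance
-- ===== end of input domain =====

-- B replaces A's accumulate-with-early-return loop by a validity check plus a table-driven map (idiomatic).

-- ===== PORT A =====
-- char in digits / char in ascii_uppercase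
def pvIsDigitA (c : Char) : Bool := '0' ≤ c && c ≤ '9'
def pvIsUpperA (c : Char) : Bool := 'A' ≤ c && c ≤ 'Z'

-- the for-loop with accumulator `mask` and early `return None`
def compute_mask_go (acc : List Char) : List Char → Option String
  | [] => some (String.mk acc)
  | c :: cs =>
    if pvIsDigitA c then compute_mask_go (acc ++ ['D']) cs
    else if pvIsUpperA c then compute_mask_go (acc ++ ['L']) cs
    else none

def compute_mask (text : String) : Option String :=
  compute_mask_go [] text.toList

-- ===== PORT B =====
-- translate table lookup: 'D' for digits, 'L' for uppercase, unchanged otherwise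
def pvTranslate (c : Char) : Char :=
  if '0' ≤ c && c ≤ '9' then 'D'
  else if 'A' ≤ c && c ≤ 'Z' then 'L'
  else c

def compute_mask_alt (text : String) : Option String :=
  if text.toList.all (fun c => ('0' ≤ c && c ≤ '9') || ('A' ≤ c && c ≤ 'Z')) then
    some (String.mk (text.toList.map pvTranslate))
  else none

-- ===== PRECONDITION & SPEC =====
def Spec_compute_mask (text : String) (out : Option String) : Prop := out = compute_mask_alt text
instance (text : String) (out : Option String) : Decidable (Spec_compute_mask text out) := by unfold Spec_compute_mask; infer_instance

-- ===== CLAIM (what is proved, stated in full; the proofs are below) =====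
def Claim_equal_compute_mask : Prop := ∀ (text : String), Dom_compute_mask text → Spec_compute_mask text (compute_mask text)

-- ===== LEMMAS AND PROOFS =====
lemma compute_mask_go_eq (cs : List Char) : ∀ acc,
    compute_mask_go acc cs =
      if cs.all (fun c => ('0' ≤ c && c ≤ '9') || ('A' ≤ c && c ≤ 'Z')) then
        some (String.mk (acc ++ cs.map pvTranslate))
      else none := by
  induction cs with
  | nil => intro acc; simp [compute_mask_go]
  | cons c cs ih =>
    intro acc
    simp only [compute_mask_go, List.all_cons, List.map_cons]
    by_cases hd : pvIsDigitA c
    · have hd' : ('0' ≤ c && c ≤ '9') = true := hd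
      rw [if_pos hd, ih, hd', Bool.true_or, Bool.true_and]
      have ht : pvTranslate c = 'D' := by unfold pvTranslate; rw [if_pos hd']
      rw [ht]; simp
    · have hd' : ('0' ≤ c && c ≤ '9') = false := by simpa [pvIsDigitA] using hd
      by_cases hu : pvIsUpperA c
      · have hu' : ('A' ≤ c && c ≤ 'Z') = true := hu
        rw [if_neg hd, if_pos hu, ih, hd', hu', Bool.false_or, Bool.true_and]
        have ht : pvTranslate c = 'L' := by
          unfold pvTranslate; rw [if_neg (by simp [hd']), if_pos hu']
        rw [ht]; simp
      · have hu' : ('A' ≤ c && c ≤ 'Z') = false := by simpa [pvIsUpperA] using hu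
        rw [if_neg hd, if_neg hu, hd', hu']
        simp

-- ===== VERDICT (by name: the statement is the Claim_ definition above) =====
theorem compute_mask_spec : Claim_equal_compute_mask := by
  intro text _
  unfold Spec_compute_mask compute_mask compute_mask_alt
  rw [compute_mask_go_eq]
  simp
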